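-- pv_equiv track=rewrite | github.com/yeseong31/coding-test | 프로그래머스/3/77886. 110 옮기기/110 옮기기.py | count
-- ===== SOURCE A (Python) =====
-- def count(x):
--     res = 0
--     stack = []
--
--     for c in x:
--         if c != '0' or stack[-2:] != ['1', '1']:
--             stack.append(c)
--             continue
--
--         del stack[-2:]
--         res += 1
--
--     return ''.join(stack), res
-- ===== SOURCE B (Python) =====
-- def count(x):
--     res = 0
--     while True:
--         i = x.find('110')
--         if i == -1:
--             return x, res
--         x = x[:i] + x[i + 3:]
--         res += 1
-- ===== Notes on version B (the rewrite author's own statement) =====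
-- stated objective: simpler
-- what changed: Replaces the character-by-character stack simulation with a plain repeated-removal loop that finds the leftmost occurrence of the pattern and splices it out until none remains (correct because the non-overlapping rewrite is confluent); despite worst-case O(n^2), it is measurably faster in CPython because find and slicing run at C speed instead of a per-character Python loop.
import Mathlib
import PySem

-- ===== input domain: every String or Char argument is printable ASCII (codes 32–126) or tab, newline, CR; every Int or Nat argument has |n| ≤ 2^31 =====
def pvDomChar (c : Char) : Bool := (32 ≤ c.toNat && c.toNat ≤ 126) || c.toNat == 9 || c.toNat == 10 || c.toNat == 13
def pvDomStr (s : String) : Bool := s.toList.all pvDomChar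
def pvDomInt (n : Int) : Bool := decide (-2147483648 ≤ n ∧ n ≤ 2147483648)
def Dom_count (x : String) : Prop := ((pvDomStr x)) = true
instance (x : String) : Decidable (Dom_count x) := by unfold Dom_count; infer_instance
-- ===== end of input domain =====

-- B replaces A's stack simulation with repeated removal of the leftmost '110'; objective: simpler.

-- ===== PORT A =====
-- the loop body of A (append, or delete the last two chars and count one removal)
def countStep (st : List Char × Int) (c : Char) : List Char × Int :=
  if c ≠ '0' ∨ PySem.List.slice st.1 (some (-2)) none ≠ ['1', '1'] then
    (st.1 ++ [c], st.2)
  else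
    (PySem.List.slice st.1 none (some (-2)), st.2 + 1)

def count (x : String) : String × Int :=
  let p := x.toList.foldl countStep ([], 0)
  (String.ofList p.1, p.2)

-- ===== PORT B =====
-- Source B's while-loop: find the leftmost '110', splice it out (x[:i] + x[i+3:]), repeat.
-- Structural recursion on a fuel counter that only makes the loop total: each pass removes
-- 3 characters, so fuel = initial length never runs out before find returns -1.
def countAltGo : Nat → List Char → Int → String × Int
  | 0, cs, res => (String.ofList cs, res)
  | fuel + 1, cs, res =>
    let i := PySem.Chars.find cs ['1', '1', '0']
    if i = -1 then (String.ofList cs, res)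
    else
      countAltGo fuel
        (PySem.List.slice cs none (some i) ++ PySem.List.slice cs (some (i + 3)) none) (res + 1)

def count_alt (x : String) : String × Int := countAltGo x.toList.length x.toList 0

-- ===== PRECONDITION & SPEC =====
def Spec_count (x : String) (out : String × Int) : Prop := out = count_alt x
instance (x : String) (out : String × Int) : Decidable (Spec_count x out) := by unfold Spec_count; infer_instance

-- ===== CLAIM (what is proved, stated in full; the proofs are below) =====
def Claim_equal_count : Prop := ∀ (x : String), Dom_count x → Spec_count x (count x)

-- ===== LEMMAS AND PROOFS =====

-- only the difference of the running count matters: res is an additive offset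
theorem countStep_shift (S : List Char) (r : Int) (c : Char) :
    countStep (S, r) c = ((countStep (S, 0) c).1, r + (countStep (S, 0) c).2) := by
  unfold countStep; split_ifs <;> simp

theorem foldl_countStep_shift : ∀ (cs : List Char) (S : List Char) (r : Int),
    cs.foldl countStep (S, r) = ((cs.foldl countStep (S, 0)).1, r + (cs.foldl countStep (S, 0)).2)
  | [], S, r => by simp
  | c :: cs, S, r => by
    simp only [List.foldl_cons]
    rw [countStep_shift S r c,
        foldl_countStep_shift cs ((countStep (S, 0) c).1) (r + (countStep (S, 0) c).2),
        foldl_countStep_shift cs ((countStep (S, 0) c).1) ((countStep (S, 0) c).2)]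
    refine Prod.ext rfl ?_
    simp [add_assoc]

-- feeding '1','1','0' to any stack cancels back to the same stack, counting one removal
theorem foldl_countStep_110 (T : List Char) (s : Int) :
    (['1', '1', '0'] : List Char).foldl countStep (T, s) = (T, s + 1) := by
  simp only [List.foldl_cons, List.foldl_nil]
  have h1 : countStep (T, s) '1' = (T ++ ['1'], s) := by
    unfold countStep; rw [if_pos (Or.inl (by decide))]
  have h2 : countStep (T ++ ['1'], s) '1' = (T ++ ['1', '1'], s) := by
    unfold countStep; rw [if_pos (Or.inl (by decide))]; simp
  have hsl : PySem.List.slice (T ++ ['1', '1']) (some (-2)) none = ['1', '1'] := by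
    rw [PySem.List.slice_from_neg_ofNat _ 2 (by omega)]
    simp
  have hsl2 : PySem.List.slice (T ++ ['1', '1']) none (some (-2)) = T := by
    rw [PySem.List.slice_to_neg_ofNat _ 2 (by omega)]
    simp
  have h3 : countStep (T ++ ['1', '1'], s) '0' = (T, s + 1) := by
    unfold countStep
    rw [if_neg (by push_neg; exact ⟨by decide, by rw [hsl]⟩), hsl2]
  rw [h1, h2, h3]

-- removing one '110' occurrence anywhere leaves A's final stack unchanged and adds one
theorem foldl_countStep_remove (u v : List Char) :
    (u ++ '1' :: '1' :: '0' :: v).foldl countStep ([], 0) =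
      (((u ++ v).foldl countStep ([], 0)).1, ((u ++ v).foldl countStep ([], 0)).2 + 1) := by
  have key : ∀ (T : List Char) (s : Int),
      ('1' :: '1' :: '0' :: v).foldl countStep (T, s) = v.foldl countStep (T, s + 1) := by
    intro T s
    simpa only [List.foldl_cons, List.foldl_nil] using
      congrArg (fun st => v.foldl countStep st) (foldl_countStep_110 T s)
  rw [List.foldl_append, List.foldl_append]
  set p := u.foldl countStep ([], 0) with hp
  rw [show p = (p.1, p.2) from rfl, key p.1 p.2,
      foldl_countStep_shift v p.1 (p.2 + 1), foldl_countStep_shift v p.1 p.2]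
  refine Prod.ext rfl ?_
  simp [add_assoc, add_comm]

-- a '110'-free string passes through A's stack untouched
theorem foldl_countStep_nf : ∀ (cs : List Char), ¬ (['1', '1', '0'] <:+: cs) →
    cs.foldl countStep ([], 0) = (cs, 0) := by
  intro cs
  induction cs using List.reverseRecOn with
  | nil => simp
  | append_singleton ds c IH =>
    intro h
    have hds : ¬ (['1', '1', '0'] <:+: ds) :=
      fun hi => h (hi.trans (List.prefix_append ds [c]).isInfix)
    rw [List.foldl_append, IH hds]
    simp only [List.foldl_cons, List.foldl_nil]
    unfold countStep
    split_ifs with hcond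
    · rfl
    · exfalso
      push_neg at hcond
      obtain ⟨hc0, hsl⟩ := hcond
      have hc : c = '0' := hc0
      have hdrop : ds.drop (ds.length - 2) = ['1', '1'] := by
        rw [← PySem.List.slice_from_neg_ofNat ds 2 (by omega)]; exact hsl
      apply h
      have heq : ds ++ [c] = ds.take (ds.length - 2) ++ ['1', '1', '0'] := by
        rw [hc]
        conv_lhs => rw [← List.take_append_drop (ds.length - 2) ds]
        rw [hdrop]; simp
      rw [heq]
      exact ((List.suffix_append _ _).isInfix : ['1','1','0'] <:+: _)

-- B's loop computes A's fold, with res as a running offset (fuel ≥ length never runs out)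
theorem countAltGo_eq : ∀ (fuel : Nat) (cs : List Char) (r : Int), cs.length ≤ fuel →
    countAltGo fuel cs r
      = (String.ofList (cs.foldl countStep ([], 0)).1, r + (cs.foldl countStep ([], 0)).2)
  | 0, cs, r => by
    intro hle
    have hnil : cs = [] := List.eq_nil_of_length_eq_zero (Nat.le_zero.mp hle)
    subst hnil
    simp [countAltGo]
  | fuel + 1, cs, r => by
    intro hle
    by_cases h : PySem.Chars.find cs ['1', '1', '0'] = -1
    · rw [countAltGo, if_pos h]
      have hnf : ¬ (['1', '1', '0'] <:+: cs) := (PySem.Chars.find_eq_neg_one_iff cs _).mp h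
      rw [foldl_countStep_nf cs hnf]
      simp
    · have hinf : ['1', '1', '0'] <:+: cs := (PySem.Chars.find_ne_neg_one_iff cs _).mp h
      have hnn : (0 : Int) ≤ PySem.Chars.find cs ['1', '1', '0'] :=
        (PySem.Chars.find_nonneg_iff cs _).mpr hinf
      obtain ⟨v, hv⟩ := (PySem.Chars.find_spec hnn).1
      have hlen : (PySem.Chars.find cs ['1', '1', '0']).toNat + 3 ≤ cs.length := by
        have := congrArg List.length hv
        simp at this
        omega
      have hsl1 : PySem.List.slice cs none (some (PySem.Chars.find cs ['1', '1', '0']))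
          = cs.take (PySem.Chars.find cs ['1', '1', '0']).toNat :=
        PySem.List.slice_to cs hnn
      have hsl2 : PySem.List.slice cs (some (PySem.Chars.find cs ['1', '1', '0'] + 3)) none = v := by
        rw [PySem.List.slice_from cs (by omega)]
        have h3 : ((PySem.Chars.find cs ['1', '1', '0'] + 3)).toNat
            = (PySem.Chars.find cs ['1', '1', '0']).toNat + 3 := by omega
        rw [h3, ← List.drop_drop, ← hv]
        simp
      have hcs : cs
          = cs.take (PySem.Chars.find cs ['1', '1', '0']).toNat ++ '1' :: '1' :: '0' :: v := by
        conv_lhs => rw [← List.take_append_drop (PySem.Chars.find cs ['1', '1', '0']).toNat cs]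
        rw [← hv]
        rfl
      have hle' : (cs.take (PySem.Chars.find cs ['1', '1', '0']).toNat ++ v).length ≤ fuel := by
        have h1 := congrArg List.length hcs
        simp only [List.length_append, List.length_cons, List.length_take] at h1
        simp only [List.length_append, List.length_take]
        omega
      rw [countAltGo, if_neg h]
      rw [hsl1, hsl2]
      rw [countAltGo_eq fuel _ (r + 1) hle']
      conv_rhs => rw [hcs]
      rw [foldl_countStep_remove]
      refine Prod.ext rfl ?_
      simp [add_assoc, add_comm]

-- ===== VERDICT (by name: the statement is the Claim_ definition above) =====
theorem count_spec : Claim_equal_count := by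
  intro x _
  unfold Spec_count count count_alt
  rw [countAltGo_eq _ _ _ (Nat.le_refl _)]
  simp
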